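-- pv_equiv track=rewrite | github.com/marivucko/ASM | DZ2 - Projekat - kod/src/analysis/helper_analysis/basic_analysis.py | get_size_of_connected_components_distribution
-- ===== SOURCE A (Python) =====
-- from collections import Counter
-- import collections
--
-- def get_size_of_connected_components_distribution(connected_components):
--     size_of_connected_components = Counter(connected_components)
--     size_of_connected_components_distribution = collections.OrderedDict(
--         sorted(size_of_connected_components.items(), reverse=True))
--     s = ''
--     for index, item in enumerate(size_of_connected_components_distribution):
--         s = s + str(item) + 'x' + str(size_of_connected_components_distribution[item])
--         if index != (len(size_of_connected_components_distribution) - 1):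
--             s = s + ', '
--     return s
-- ===== SOURCE B (Python) =====
-- def get_size_of_connected_components_distribution(connected_components):
--     data = sorted(connected_components, reverse=True)
--     pieces = []
--     i = 0
--     n = len(data)
--     while i < n:
--         j = i + 1
--         while j < n and data[j] == data[i]:
--             j += 1
--         pieces.append(str(data[i]) + 'x' + str(j - i))
--         i = j
--     return ', '.join(pieces)
-- ===== Notes on version B (the rewrite author's own statement) =====
-- stated objective: alternative
-- what changed: Replaces the Counter hash table, the sort of its items and the OrderedDict walk with string-slicing by a single sort of the raw list in descending order followed by one run-length scan whose pieces are joined with ', '.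
import Mathlib
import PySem

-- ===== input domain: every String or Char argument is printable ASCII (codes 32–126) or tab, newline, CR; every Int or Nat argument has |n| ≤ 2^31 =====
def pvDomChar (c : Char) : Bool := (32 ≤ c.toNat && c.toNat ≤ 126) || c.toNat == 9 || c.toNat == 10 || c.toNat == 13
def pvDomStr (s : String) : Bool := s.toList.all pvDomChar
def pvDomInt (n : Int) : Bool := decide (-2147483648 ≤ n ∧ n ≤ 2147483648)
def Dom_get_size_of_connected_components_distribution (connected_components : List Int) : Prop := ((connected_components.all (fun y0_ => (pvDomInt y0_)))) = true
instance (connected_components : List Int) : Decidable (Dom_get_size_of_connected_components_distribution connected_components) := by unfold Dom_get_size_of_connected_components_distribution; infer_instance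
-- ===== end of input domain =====

-- B replaces A's Counter + sorted(items, reverse=True) + OrderedDict walk by sorting the raw
-- list in descending order and emitting one "value x run-length" piece per run, joined by ', '
-- (alternative decomposition, same O(n log n) cost; return values proved equal on all inputs).

-- ===== PORT A =====
-- the string is built as List Char (Python's str concatenation, exact) and packed by String.ofList at the end
def get_size_of_connected_components_distribution (connected_components : List Int) : String :=
  let counts : PySem.Dict Int Int := PySem.Dict.counter connected_components
  -- sorted(counts.items(), reverse=True): Python compares the (key, count) tuples lexicographically
  let sortedItems : List (Int × Int) :=
    PySem.List.sorted2 counts.items (fun p => p.1) (fun p => p.2) true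
  -- collections.OrderedDict(sortedItems)
  let od : PySem.Dict Int Int :=
    sortedItems.foldl (fun d p => d.insert p.1 p.2) PySem.Dict.empty
  let n : Int := (od.keys.length : Int)   -- len(size_of_connected_components_distribution)
  let s : List Char :=
    (PySem.List.enumerate od.keys 0).foldl
      (fun s p =>
        let s := s ++ PySem.Int.toChars p.2 ++ ['x'] ++ PySem.Int.toChars (od.getD p.2 0)
        if p.1 ≠ n - 1 then s ++ [',', ' '] else s) []
  String.ofList s

-- ===== PORT B =====
-- the run-length scan of Source B: the inner `while data[j] == data[i]` is the takeWhile/dropWhile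
-- split of the remainder, the outer while is the recursion on the remainder
def pvRuns (l : List Int) : List (Int × Int) :=
  match l with
  | [] => []
  | x :: t =>
    (x, (1 + ((t.takeWhile (fun y => y == x)).length : Int))) ::
      pvRuns (t.dropWhile (fun y => y == x))
termination_by l.length
decreasing_by
  simpa using Nat.lt_succ_of_le (List.length_dropWhile_le (fun y => y == x) t)

def get_size_of_connected_components_distribution_alt (connected_components : List Int) : String :=
  let data := PySem.List.sorted connected_components (fun x => x) true
  let pieces := (pvRuns data).map
    (fun p => PySem.Int.toChars p.1 ++ ['x'] ++ PySem.Int.toChars p.2)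
  String.ofList (PySem.Chars.join [',', ' '] pieces)

-- ===== PRECONDITION & SPEC =====
def Spec_get_size_of_connected_components_distribution (connected_components : List Int) (out : String) : Prop := out = get_size_of_connected_components_distribution_alt connected_components
instance (connected_components : List Int) (out : String) : Decidable (Spec_get_size_of_connected_components_distribution connected_components out) := by unfold Spec_get_size_of_connected_components_distribution; infer_instance

-- ===== CLAIM (what is proved, stated in full; the proofs are below) =====
def Claim_equal_get_size_of_connected_components_distribution : Prop := ∀ (connected_components : List Int), Dom_get_size_of_connected_components_distribution connected_components → Spec_get_size_of_connected_components_distribution connected_components (get_size_of_connected_components_distribution connected_components)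

-- ===== LEMMAS AND PROOFS =====

theorem pv_enum_cons (x : Int) (t : List Int) (st : Int) :
    PySem.List.enumerate (x :: t) st = (st, x) :: PySem.List.enumerate t (st + 1) := rfl

theorem pv_enum_nil (st : Int) : PySem.List.enumerate ([] : List Int) st = [] := rfl

-- insertBy only looks at `before x y` for y already in the list
theorem pv_insertBy_congr {α : Type} (f g : α → α → Bool) (x : α) :
    ∀ (ys : List α), (∀ y ∈ ys, f x y = g x y) →
      PySem.List.insertBy f x ys = PySem.List.insertBy g x ys := by
  intro ys
  induction ys with
  | nil => intro _; rfl
  | cons y ys ih =>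
    intro h
    simp only [PySem.List.insertBy, h y (by simp)]
    split
    · rfl
    · simp only [List.cons.injEq, true_and]
      exact ih (fun z hz => h z (by simp [hz]))

-- a foldl of insertBy's only compares elements drawn from the input and the accumulator
theorem pv_foldl_insertBy_congr {α : Type} (f g : α → α → Bool) :
    ∀ (xs acc : List α),
      (∀ a, (a ∈ xs ∨ a ∈ acc) → ∀ b, (b ∈ xs ∨ b ∈ acc) → f a b = g a b) →
      xs.foldl (fun a x => PySem.List.insertBy f x a) acc
        = xs.foldl (fun a x => PySem.List.insertBy g x a) acc := by
  intro xs
  induction xs with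
  | nil => intro acc _; rfl
  | cons x xs ih =>
    intro acc h
    simp only [List.foldl_cons]
    rw [pv_insertBy_congr f g x acc
      (fun y hy => h x (Or.inl (by simp)) y (Or.inr hy))]
    refine ih _ ?_
    have mem : ∀ c, c ∈ xs ∨ c ∈ PySem.List.insertBy g x acc → c ∈ x :: xs ∨ c ∈ acc := by
      intro c hc
      rcases hc with hc | hc
      · exact Or.inl (List.mem_cons_of_mem _ hc)
      · rcases (PySem.List.mem_insertBy g x c acc).1 hc with rfl | hc
        · exact Or.inl (by simp)
        · exact Or.inr hc
    exact fun a ha b hb => h a (mem a ha) b (mem b hb)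

-- when the first components are pairwise distinct, Python's tuple sort is the sort by first component
theorem pv_sorted2_pairs_eq (xs : List (Int × Int)) (hn : (xs.map Prod.fst).Nodup) :
    PySem.List.sorted2 xs (fun p => p.1) (fun p => p.2) true
      = PySem.List.sorted xs (fun p => p.1) true := by
  rw [PySem.List.sorted_rev_eq_foldl_insertBy]
  show xs.foldl (fun acc x => PySem.List.insertBy _ x acc) [] = _
  apply pv_foldl_insertBy_congr
  intro a ha b hb
  replace ha : a ∈ xs := ha.resolve_right (by simp)
  replace hb : b ∈ xs := hb.resolve_right (by simp)
  by_cases hab : b.1 = a.1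
  · have : b = a := List.inj_on_of_nodup_map hn hb ha hab
    subst this
    simp
  · rcases lt_or_gt_of_ne hab with h | h <;> simp [h, not_lt_of_gt h]

-- every first component of a run comes from the list
theorem pv_runs_fst_mem : ∀ (l : List Int), ∀ p ∈ pvRuns l, p.1 ∈ l := by
  intro l
  induction l using pvRuns.induct with
  | case1 => simp [pvRuns]
  | case2 x t ih =>
    intro p hp
    rw [pvRuns] at hp
    rcases List.mem_cons.1 hp with rfl | hp
    · simp
    · exact List.mem_cons_of_mem _ ((List.dropWhile_sublist _).mem (ih p hp))

theorem pv_mem_runs_fst : ∀ (l : List Int) (y : Int), y ∈ (pvRuns l).map Prod.fst ↔ y ∈ l := by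
  intro l
  induction l using pvRuns.induct with
  | case1 => simp [pvRuns]
  | case2 x t ih =>
    intro y
    rw [pvRuns]
    simp only [List.map_cons, List.mem_cons, ih]
    constructor
    · rintro (rfl | h)
      · simp
      · exact Or.inr ((List.dropWhile_sublist _).mem h)
    · rintro (rfl | h)
      · exact Or.inl rfl
      · conv at h => rw [← List.takeWhile_append_dropWhile (p := fun y => y == x) (l := t)]
        rcases List.mem_append.1 h with h | h
        · exact Or.inl (by simpa using List.mem_takeWhile_imp h)
        · exact Or.inr h

-- on a descending list, everything the dropWhile keeps is strictly below the run value
theorem pv_rest_lt (x : Int) (t : List Int)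
    (hall : ∀ y ∈ t, y ≤ x) (hp : t.Pairwise (fun a b => b ≤ a)) :
    ∀ y ∈ t.dropWhile (fun y => y == x), y < x := by
  cases hr : t.dropWhile (fun y => y == x) with
  | nil => simp
  | cons r0 r' =>
    have hr0ne : (r0 == x) = false := by
      have := List.head_dropWhile_not (fun y => y == x) (l := t) (by simp [hr])
      simpa [hr] using this
    have hsub : (r0 :: r').Sublist t := hr ▸ List.dropWhile_sublist _
    have hr0lt : r0 < x := lt_of_le_of_ne (hall r0 (hsub.mem (by simp))) (by simpa using hr0ne)
    have hp' : (r0 :: r').Pairwise (fun a b => b ≤ a) := hp.sublist hsub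
    intro y hy
    rcases List.mem_cons.1 hy with rfl | hy
    · exact hr0lt
    · exact lt_of_le_of_lt ((List.pairwise_cons.1 hp').1 y hy) hr0lt

-- first components of the runs of a descending list are strictly decreasing
theorem pv_runs_pairwise : ∀ (l : List Int), l.Pairwise (fun a b => b ≤ a) →
    (pvRuns l).Pairwise (fun p q => q.1 < p.1) := by
  intro l
  induction l using pvRuns.induct with
  | case1 => simp [pvRuns]
  | case2 x t ih =>
    intro hp
    rw [pvRuns]
    have hall : ∀ y ∈ t, y ≤ x := (List.pairwise_cons.1 hp).1
    have hpt : t.Pairwise (fun a b => b ≤ a) := (List.pairwise_cons.1 hp).2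
    refine List.pairwise_cons.2 ⟨?_, ih (hpt.sublist (List.dropWhile_sublist _))⟩
    intro q hq
    exact pv_rest_lt x t hall hpt q.1 (pv_runs_fst_mem _ q hq)

-- on a descending list, the recorded run length is the count of its value
theorem pv_runs_count : ∀ (l : List Int), l.Pairwise (fun a b => b ≤ a) →
    ∀ p ∈ pvRuns l, p.2 = (l.count p.1 : Int) := by
  intro l
  induction l using pvRuns.induct with
  | case1 => simp [pvRuns]
  | case2 x t ih =>
    intro hp p hpmem
    have hall : ∀ y ∈ t, y ≤ x := (List.pairwise_cons.1 hp).1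
    have hpt : t.Pairwise (fun a b => b ≤ a) := (List.pairwise_cons.1 hp).2
    have hsplit : t.takeWhile (fun y => y == x) ++ t.dropWhile (fun y => y == x) = t :=
      List.takeWhile_append_dropWhile
    rw [pvRuns] at hpmem
    rcases List.mem_cons.1 hpmem with rfl | hpmem
    · -- the head run: count x (x :: t) = 1 + (takeWhile).length
      have htake : (t.takeWhile (fun y => y == x)).count x
          = (t.takeWhile (fun y => y == x)).length :=
        List.count_eq_length.2
          (fun b hb => ((by simpa using List.mem_takeWhile_imp hb : b = x)).symm)
      have hdrop : (t.dropWhile (fun y => y == x)).count x = 0 :=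
        List.count_eq_zero.2 (fun hmem => lt_irrefl x (pv_rest_lt x t hall hpt x hmem))
      have hcount_t : t.count x = (t.takeWhile (fun y => y == x)).length := by
        conv_lhs => rw [← hsplit]
        rw [List.count_append, htake, hdrop, Nat.add_zero]
      simp only [List.count_cons_self, hcount_t]
      push_cast
      ring
    · -- a later run: its value is < x, hence absent from the head and its run
      have hrest : (t.dropWhile (fun y => y == x)).Pairwise (fun a b => b ≤ a) :=
        hpt.sublist (List.dropWhile_sublist _)
      have hv := ih hrest p hpmem
      have hne : p.1 ≠ x :=
        ne_of_lt (pv_rest_lt x t hall hpt p.1 (pv_runs_fst_mem _ p hpmem))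
      have htake0 : (t.takeWhile (fun y => y == x)).count p.1 = 0 :=
        List.count_eq_zero.2 (fun hmem => hne (by simpa using List.mem_takeWhile_imp hmem))
      have hcnt : (x :: t).count p.1 = (t.dropWhile (fun y => y == x)).count p.1 := by
        have hx : ¬ (x = p.1) := fun h => hne h.symm
        conv_lhs => rw [← hsplit]
        simp only [List.count_cons, List.count_append, htake0, beq_iff_eq, if_neg hx,
          Nat.add_zero, Nat.zero_add]
      rw [hv, hcnt]

-- the last-index-tested accumulation over enumerate IS sep.join
theorem pv_foldl_enum_join (f : Int → List Char) (sep : List Char) :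
    ∀ (ks : List Int) (st m : Int) (acc : List Char), m = st + ks.length - 1 →
      (PySem.List.enumerate ks st).foldl
        (fun s p => if p.1 ≠ m then (s ++ f p.2) ++ sep else s ++ f p.2) acc
      = acc ++ PySem.Chars.join sep (ks.map f) := by
  intro ks
  induction ks with
  | nil =>
    intro st m acc _
    rw [pv_enum_nil]
    simp [PySem.Chars.join_nil]
  | cons k ks ih =>
    intro st m acc h
    rw [pv_enum_cons, List.foldl_cons]
    cases ks with
    | nil =>
      have hm : st = m := by simp at h; omega
      rw [pv_enum_nil]
      simp [hm, PySem.Chars.join_singleton]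
    | cons k' t =>
      have hne : ¬ (st = m) := by simp at h; omega
      simp only [if_pos (by exact hne : st ≠ m)]
      rw [ih (st + 1) m _ (by simp at h ⊢; omega)]
      simp [PySem.Chars.join_cons_cons, List.append_assoc]

-- the two programs agree everywhere
theorem pv_main (cc : List Int) :
    get_size_of_connected_components_distribution cc
      = get_size_of_connected_components_distribution_alt cc := by
  have hdsperm : (PySem.List.sorted cc (fun x => x) true).Perm cc :=
    PySem.List.sorted_perm cc (fun x => x) true
  have hdspair : (PySem.List.sorted cc (fun x => x) true).Pairwise (fun a b => b ≤ a) :=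
    PySem.List.sorted_pairwise_rev cc (fun x => x)
  set ds := PySem.List.sorted cc (fun x => x) true with hds
  set L := pvRuns ds with hLdef
  have hLpair : L.Pairwise (fun p q => q.1 < p.1) := pv_runs_pairwise ds hdspair
  have hLfstnodup : (L.map Prod.fst).Nodup :=
    (List.pairwise_map).2 (hLpair.imp (fun h => ne_of_gt h))
  have hmemL : ∀ y, y ∈ L.map Prod.fst ↔ y ∈ PySem.Set.ofList cc := by
    intro y
    rw [hLdef, pv_mem_runs_fst, PySem.Set.mem_ofList, hds]
    exact hdsperm.mem_iff
  have hkeysperm : (L.map Prod.fst).Perm (PySem.Set.ofList cc) :=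
    (List.perm_ext_iff_of_nodup hLfstnodup (PySem.Set.nodup_ofList cc)).2 hmemL
  have hLid : L.map (fun p => (p.1, (cc.count p.1 : Int))) = L := by
    conv_rhs => rw [← List.map_id L]
    apply List.map_congr_left
    intro p hp
    have h2 : p.2 = (ds.count p.1 : Int) := pv_runs_count ds hdspair p hp
    have h3 : ds.count p.1 = cc.count p.1 := hdsperm.count_eq p.1
    cases p with
    | mk a b =>
      simp only [id_eq, Prod.mk.injEq, true_and]
      simp only at h2
      rw [h2, h3]
  have hLperm : L.Perm ((PySem.Set.ofList cc).map (fun k => (k, (cc.count k : Int)))) := by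
    have h1 : L = (L.map Prod.fst).map (fun k => (k, (cc.count k : Int))) := by
      rw [List.map_map]; exact hLid.symm
    rw [h1]
    exact hkeysperm.map _
  have hitems : (PySem.Dict.counter cc).items
      = (PySem.Set.ofList cc).map (fun k => (k, (cc.count k : Int))) :=
    PySem.Dict.items_counter cc
  have hsortL : PySem.List.sorted (PySem.Dict.counter cc).items (fun p => p.1) true = L := by
    rw [hitems]
    exact PySem.List.sorted_rev_eq_of_perm_of_pairwise_gt _ L (fun p => p.1) hLperm hLpair
  have hitemsnodup : ((PySem.Dict.counter cc).items.map Prod.fst).Nodup := by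
    have hid : (Prod.fst ∘ fun k : Int => ((k, (cc.count k : Int)) : Int × Int)) = id := rfl
    rw [hitems, List.map_map, hid, List.map_id]
    exact PySem.Set.nodup_ofList cc
  have hL : PySem.List.sorted2 (PySem.Dict.counter cc).items
      (fun p => p.1) (fun p => p.2) true = L := by
    rw [pv_sorted2_pairs_eq _ hitemsnodup, hsortL]
  unfold get_size_of_connected_components_distribution
    get_size_of_connected_components_distribution_alt
  simp only [hL, ← hds, ← hLdef]
  set od := L.foldl (fun d p => d.insert p.1 p.2) (PySem.Dict.empty : PySem.Dict Int Int)
    with hod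
  have hoditems : od.items = L := by
    have := PySem.Dict.items_foldl_insert_fresh L (fun p => p.1) (fun p => p.2)
      (PySem.Dict.empty : PySem.Dict Int Int)
      (fun a _ => PySem.Dict.contains_empty _) hLfstnodup
    simpa [hod] using this
  have hodkeys : od.keys = L.map Prod.fst := by
    simp only [PySem.Dict.keys, hoditems]
  have hodnodup : od.keys.Nodup := by rw [hodkeys]; exact hLfstnodup
  have hgetD : ∀ p ∈ L, od.getD p.1 0 = p.2 := fun p hp =>
    PySem.Dict.getD_of_mem_items od (by rw [hoditems]; exact hp) hodnodup 0
  have hstep :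
      (fun (s : List Char) (p : Int × Int) =>
          let s := s ++ PySem.Int.toChars p.2 ++ ['x'] ++ PySem.Int.toChars (od.getD p.2 0)
          if p.1 ≠ ((od.keys.length : Int)) - 1 then s ++ [',', ' '] else s)
        = (fun s p =>
            if p.1 ≠ ((od.keys.length : Int)) - 1 then
              (s ++ (PySem.Int.toChars p.2 ++ (['x'] ++ PySem.Int.toChars (od.getD p.2 0))))
                ++ [',', ' ']
            else
              s ++ (PySem.Int.toChars p.2 ++ (['x'] ++ PySem.Int.toChars (od.getD p.2 0)))) := by
    funext s p
    simp [List.append_assoc]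
  rw [hstep,
    pv_foldl_enum_join (fun k => PySem.Int.toChars k ++ (['x'] ++ PySem.Int.toChars (od.getD k 0)))
      [',', ' '] od.keys 0 _ [] (by omega),
    List.nil_append]
  refine congrArg String.ofList (congrArg (PySem.Chars.join [',', ' ']) ?_)
  rw [hodkeys, List.map_map]
  apply List.map_congr_left
  intro p hp
  simp [Function.comp, hgetD p hp, List.append_assoc]

-- ===== VERDICT (by name: the statement is the Claim_ definition above) =====
theorem get_size_of_connected_components_distribution_spec : Claim_equal_get_size_of_connected_components_distribution := by
  intro cc _
  unfold Spec_get_size_of_connected_components_distribution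
  exact pv_main cc
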